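-- pv_equiv track=rewrite | github.com/mikhaaiil/CodeRunBoostChallenge | princess_7270.py | solution
-- ===== SOURCE A (Python) =====
-- def solution(n, q, a, queries):
--     count = [0] * (n + 2)
--     for l, r in queries:
--         count[l] += 1
--         if r + 1 <= n:
--             count[r + 1] -= 1
--     for i in range(1, n + 1):
--         count[i] += count[i - 1]
--     frequencies = count[1:n+1]
--     a_sorted = sorted(a, reverse=True)
--     frequencies_sorted = sorted(frequencies, reverse=True)
--     total = 0
--     for ai, freq in zip(a_sorted, frequencies_sorted):
--         total += ai * freq
--     return total
-- ===== SOURCE B (Python) =====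
-- def solution(n, q, a, queries):
--     delta = [0] * (n + 2)
--     for l, r in queries:
--         delta[l] += 1
--         if r + 1 <= n:
--             delta[r + 1] -= 1
--     freqs = []
--     run = 0
--     for d in delta[:n + 1]:
--         run += d
--         freqs.append(run)
--     freqs = freqs[1:]
--     vals = list(a)
--     total = 0
--     while vals and freqs:
--         mv = max(vals)
--         mf = max(freqs)
--         total += mv * mf
--         vals.remove(mv)
--         freqs.remove(mf)
--     return total
-- ===== Notes on version B (the rewrite author's own statement) =====
-- stated objective: alternative
-- what changed: B keeps A's difference-array writes (they define the query-to-buffer map, including Python's index semantics) but replaces the in-place prefix-sum mutation + slice by a running-sum pass building a fresh list, and eliminates sorting entirely: instead of A's two descending sorts zipped together, B pairs values with frequencies greedily by repeatedly extracting the maximum of each list with max/remove.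
import Mathlib
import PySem

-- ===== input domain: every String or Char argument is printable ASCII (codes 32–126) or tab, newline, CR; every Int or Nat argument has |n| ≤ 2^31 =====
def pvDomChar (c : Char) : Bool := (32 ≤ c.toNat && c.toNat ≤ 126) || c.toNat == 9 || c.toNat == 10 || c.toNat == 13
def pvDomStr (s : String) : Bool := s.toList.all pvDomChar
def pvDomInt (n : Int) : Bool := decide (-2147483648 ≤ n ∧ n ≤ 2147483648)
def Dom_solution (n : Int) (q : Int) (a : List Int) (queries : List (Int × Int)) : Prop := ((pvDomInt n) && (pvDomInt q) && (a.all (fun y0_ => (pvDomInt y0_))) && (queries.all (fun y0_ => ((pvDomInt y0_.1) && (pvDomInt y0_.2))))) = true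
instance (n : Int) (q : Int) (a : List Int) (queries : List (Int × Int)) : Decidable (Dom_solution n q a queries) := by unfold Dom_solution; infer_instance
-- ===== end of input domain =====

-- B keeps A's difference-array writes (they define the query-to-buffer map,
-- including Python's index semantics) but replaces the in-place prefix-sum
-- mutation + slice by a running-sum pass building a fresh list, and drops all
-- sorting: values and frequencies are paired greedily by repeated max/remove;
-- proved equal on every input on which A returns.

-- Python-list index helpers shared by both ports (the difference buffer is a
-- Python list): exact wherever the Python subscript returns, including
-- negative-index wraparound; where Python raises IndexError these return the
-- list unchanged / 0 (both Python programs raise there, so no behaviour is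
-- claimed on those inputs).
def aIdx (sz : Nat) (i : Int) : Int := if i < 0 then i + (sz : Int) else i
def aGet (c : Array Int) (i : Int) : Int :=
  if 0 ≤ aIdx c.size i then c.getD (aIdx c.size i).toNat 0 else 0
def aSet (c : Array Int) (i : Int) (v : Int) : Array Int :=
  if 0 ≤ aIdx c.size i then c.setIfInBounds (aIdx c.size i).toNat v else c

-- ===== PORT A =====
-- count[l] += 1; if r + 1 <= n: count[r + 1] -= 1
def solDiffStep (n : Int) (c : Array Int) (lr : Int × Int) : Array Int :=
  let c1 := aSet c lr.1 (aGet c lr.1 + 1)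
  if lr.2 + 1 ≤ n then aSet c1 (lr.2 + 1) (aGet c1 (lr.2 + 1) - 1) else c1

-- count[i] += count[i-1]
def solPrefStep (c : Array Int) (i : Int) : Array Int :=
  aSet c i (aGet c i + aGet c (i - 1))

def solution (n : Int) (q : Int) (a : List Int) (queries : List (Int × Int)) : Int :=
  let count0 : Array Int := (PySem.List.pyRepeat [0] (n + 2)).toArray
  let count1 := queries.foldl (solDiffStep n) count0
  let count2 := (PySem.List.pyRange 1 (n + 1) 1).foldl solPrefStep count1
  let frequencies := PySem.List.slice count2.toList (some 1) (some (n + 1))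
  -- sorted(·, reverse=True): stable descending sort (mergesort, as CPython's sorted)
  let aSorted := a.mergeSort (fun x y => decide (y ≤ x))
  let fSorted := frequencies.mergeSort (fun x y => decide (y ≤ x))
  (aSorted.zip fSorted).foldl (fun t p => t + p.1 * p.2) 0

-- ===== PORT B =====
-- delta[l] += 1; if r + 1 <= n: delta[r + 1] -= 1   (Source B's first loop)
def solAltDiffStep (n : Int) (c : Array Int) (lr : Int × Int) : Array Int :=
  let c1 := aSet c lr.1 (aGet c lr.1 + 1)
  if lr.2 + 1 ≤ n then aSet c1 (lr.2 + 1) (aGet c1 (lr.2 + 1) - 1) else c1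

-- run += d; freqs.append(run)   (Source B's running-sum loop)
def solAltScanStep (s : Int × Array Int) (d : Int) : Int × Array Int :=
  (s.1 + d, s.2.push (s.1 + d))

-- while vals and freqs: total += max(vals) * max(freqs); vals.remove(...); freqs.remove(...)
-- (max(xs) is the first maximal element; list.remove removes its first occurrence;
--  remove? cannot miss here since the removed value is a member, so getD is exact)
def pairGreedy (vals freqs : List Int) (total : Int) : Int :=
  match h1 : PySem.List.max? vals (fun x => x), PySem.List.max? freqs (fun x => x) with
  | some mv, some mf =>
      pairGreedy ((PySem.List.remove? vals mv).getD vals)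
        ((PySem.List.remove? freqs mf).getD freqs) (total + mv * mf)
  | some _, none => total
  | none, _ => total
termination_by vals.length
decreasing_by
  have hm := PySem.List.max?_mem h1
  simp [PySem.List.remove?_eq_some_erase vals mv hm, List.length_erase_of_mem hm]
  have : 0 < vals.length := List.length_pos_of_mem hm
  omega

def solution_alt (n : Int) (q : Int) (a : List Int) (queries : List (Int × Int)) : Int :=
  let delta0 : Array Int := (PySem.List.pyRepeat [0] (n + 2)).toArray
  let delta := queries.foldl (solAltDiffStep n) delta0
  let scanned := (PySem.List.slice delta.toList none (some (n + 1))).foldl solAltScanStep (0, #[])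
  let freqs := PySem.List.slice scanned.2.toList (some 1) none
  -- vals = list(a) is a copy of an immutable value here
  pairGreedy a freqs 0

-- ===== PRECONDITION & SPEC =====
-- Exactly the inputs on which A's list subscripts are in range, i.e. on which the
-- Python A returns (A raises IndexError otherwise; B raises on exactly the same
-- inputs, since it performs the same buffer writes).
def Pre_solution (n : Int) (q : Int) (a : List Int) (queries : List (Int × Int)) : Prop :=
  ∀ lr ∈ queries, (-(max (n + 2) 0) ≤ lr.1 ∧ lr.1 < max (n + 2) 0) ∧
    (lr.2 + 1 ≤ n → -(max (n + 2) 0) ≤ lr.2 + 1)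
instance (n : Int) (q : Int) (a : List Int) (queries : List (Int × Int)) : Decidable (Pre_solution n q a queries) := by unfold Pre_solution; infer_instance

def pvWitness_solution : Int × Int × List Int × (List (Int × Int)) := (3, 2, [5, 3, 1], [(1, 2), (2, 5)])

def Spec_solution (n : Int) (q : Int) (a : List Int) (queries : List (Int × Int)) (out : Int) : Prop := out = solution_alt n q a queries
instance (n : Int) (q : Int) (a : List Int) (queries : List (Int × Int)) (out : Int) : Decidable (Spec_solution n q a queries out) := by unfold Spec_solution; infer_instance

-- ===== CLAIM (what is proved, stated in full; the proofs are below) =====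
def Claim_equal_solution : Prop := ∀ (n : Int) (q : Int) (a : List Int) (queries : List (Int × Int)), Dom_solution n q a queries → Pre_solution n q a queries → Spec_solution n q a queries (solution n q a queries)

-- ===== LEMMAS AND PROOFS =====

-- the two ports' first loops are the same function
lemma altDiffStep_eq : solAltDiffStep = solDiffStep := rfl

-- bridges from the Array helpers to List-level operations (nonnegative index)
lemma arr_getD_toList (xs : Array Int) (i : Nat) (d : Int) : xs.getD i d = xs.toList.getD i d := by
  unfold Array.getD List.getD
  split <;> simp_all

lemma aIdx_nonneg (sz : Nat) (i : Int) (h : 0 ≤ i) : aIdx sz i = i := by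
  unfold aIdx
  rw [if_neg (by omega)]

lemma aGet_nonneg (c : Array Int) (i : Int) (h : 0 ≤ i) :
    aGet c i = c.toList.getD i.toNat 0 := by
  unfold aGet
  rw [aIdx_nonneg _ _ h, if_pos h, arr_getD_toList]

lemma aSet_nonneg (c : Array Int) (i : Int) (v : Int) (h : 0 ≤ i) :
    (aSet c i v).toList = c.toList.set i.toNat v := by
  unfold aSet
  rw [aIdx_nonneg _ _ h, if_pos h, Array.toList_setIfInBounds]

lemma aSet_size (c : Array Int) (i : Int) (v : Int) : (aSet c i v).size = c.size := by
  unfold aSet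
  split <;> simp

lemma solDiffStep_size (n : Int) (c : Array Int) (lr : Int × Int) :
    (solDiffStep n c lr).size = c.size := by
  simp only [solDiffStep]
  split <;> simp [aSet_size]

lemma diff_foldl_size (n : Int) (qs : List (Int × Int)) (c : Array Int) :
    (qs.foldl (solDiffStep n) c).size = c.size := by
  induction qs generalizing c with
  | nil => rfl
  | cons x xs ih => rw [List.foldl_cons, ih, solDiffStep_size]

-- List-level prefix step (what solPrefStep computes on toList, for 1 ≤ i)
def prefStepL (c : List Int) (i : Int) : List Int :=
  PySem.List.pySetD c i (PySem.List.pyGetD c i 0 + PySem.List.pyGetD c (i - 1) 0)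

lemma prefStep_toList (c : Array Int) (i : Int) (hi : 1 ≤ i) :
    (solPrefStep c i).toList = prefStepL c.toList i := by
  unfold solPrefStep prefStepL
  rw [aSet_nonneg c i _ (by omega), aGet_nonneg c i (by omega), aGet_nonneg c (i - 1) (by omega),
      PySem.List.pySetD_of_nonneg _ _ (by omega : (0:Int) ≤ i),
      show i = ((i.toNat : Nat) : Int) by omega,
      show ((i.toNat : Nat) : Int) - 1 = (((i - 1).toNat : Nat) : Int) by omega,
      PySem.List.pyGetD_natCast, PySem.List.pyGetD_natCast]
  simp [show max i 0 = i from by omega]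

lemma pref_fold_toList (xs : List Int) (c : Array Int) (hxs : ∀ i ∈ xs, 1 ≤ i) :
    (xs.foldl solPrefStep c).toList = xs.foldl prefStepL c.toList := by
  induction xs generalizing c with
  | nil => rfl
  | cons x xs ih =>
    rw [List.foldl_cons, List.foldl_cons, ih _ (fun i hi => hxs i (List.mem_cons_of_mem _ hi)),
        prefStep_toList c x (hxs x List.mem_cons_self)]

-- pointwise characterisation of list-set (getD form)
lemma getD_set (xs : List Int) (i k : Nat) (v : Int) :
    (xs.set i v).getD k 0 = if i = k ∧ k < xs.length then v else xs.getD k 0 := by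
  by_cases hk : k < xs.length
  · rw [List.getD_eq_getElem xs 0 hk, List.getD_eq_getElem _ 0 (by simpa using hk),
        List.getElem_set]
    split_ifs with h1 h2 h3 <;> simp_all
  · rw [List.getD_eq_default _ _ (by rw [List.length_set]; omega),
        List.getD_eq_default _ _ (by omega)]
    simp [hk]

def psum (c : List Int) (k : Nat) : Int := ((List.range (k + 1)).map (fun j => c.getD j 0)).sum

lemma psum_succ (c : List Int) (t : Nat) : psum c (t + 1) = psum c t + c.getD (t + 1) 0 := by
  unfold psum
  rw [List.range_succ, List.map_append, List.sum_append]
  simp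

-- pointwise characterisation of A's in-place prefix loop (getD form)
lemma pref_fold (n : Int) (hn : 0 ≤ n) (t : Nat) (ht : (t : Int) ≤ n) (c : List Int)
    (hc : c.length = (n + 2).toNat) :
    ((PySem.List.pyRange 1 ((t : Int) + 1) 1).foldl prefStepL c).length = c.length ∧
    ∀ k : Nat, ((PySem.List.pyRange 1 ((t : Int) + 1) 1).foldl prefStepL c).getD k 0 =
      if k ≤ t then psum c k else c.getD k 0 := by
  induction t with
  | zero =>
    rw [show ((0:Nat):Int) + 1 = 1 by norm_num, PySem.List.pyRange_one_eq_nil (by omega)]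
    refine ⟨rfl, fun k => ?_⟩
    simp only [List.foldl_nil]
    split_ifs with h
    · interval_cases k
      simp [psum]
    · rfl
  | succ t ih =>
    obtain ⟨hlen, hget⟩ := ih (by push_cast at ht ⊢; omega)
    have hcast : (((t + 1 : Nat)) : Int) + 1 = ((t : Int) + 1) + 1 := by push_cast; ring
    rw [hcast, PySem.List.pyRange_one_succ_right (by omega), List.foldl_append]
    set prev := (PySem.List.pyRange 1 ((t : Int) + 1) 1).foldl prefStepL c with hprev
    have hplen : prev.length = c.length := hlen
    have hklen : t + 1 < prev.length := by
      rw [hplen, hc]; push_cast at ht; omega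
    have htop : prev.getD (t + 1) 0 = c.getD (t + 1) 0 := by
      rw [hget (t + 1), if_neg (by omega)]
    have hbot : prev.getD t 0 = psum c t := by
      rw [hget t, if_pos (le_refl t)]
    simp only [List.foldl_cons, List.foldl_nil, prefStepL]
    rw [show (t : Int) + 1 - 1 = ((t : Nat) : Int) by push_cast; ring,
        show (t : Int) + 1 = ((t + 1 : Nat) : Int) by omega,
        PySem.List.pySetD_natCast, PySem.List.pyGetD_natCast, PySem.List.pyGetD_natCast,
        htop, hbot]
    refine ⟨by rw [List.length_set, hplen], fun k => ?_⟩
    rw [getD_set]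
    by_cases hk : t + 1 = k ∧ k < prev.length
    · obtain ⟨rfl, -⟩ := hk
      rw [if_pos ⟨rfl, by omega⟩, if_pos (by omega), psum_succ]
      ring
    · rw [if_neg hk, hget k]
      have hne : k ≠ t + 1 := by
        intro h; exact hk ⟨h.symm, by omega⟩
      split_ifs <;> first | rfl | omega

-- B's running-sum loop builds exactly the list of partial sums
def partials : List Int → Int → List Int
  | [], _ => []
  | x :: xs, run => (run + x) :: partials xs (run + x)

lemma scan_spec (xs : List Int) : ∀ (run : Int) (acc : Array Int),
    ((xs.foldl solAltScanStep (run, acc)).2).toList = acc.toList ++ partials xs run := by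
  induction xs with
  | nil => intro run acc; simp [partials]
  | cons x xs ih =>
    intro run acc
    rw [List.foldl_cons, show solAltScanStep (run, acc) x = (run + x, acc.push (run + x)) from rfl,
        ih (run + x) (acc.push (run + x)), Array.toList_push]
    simp [partials]

lemma length_partials (xs : List Int) (run : Int) : (partials xs run).length = xs.length := by
  induction xs generalizing run with
  | nil => rfl
  | cons x xs ih => simp [partials, ih]

lemma getElem_partials (xs : List Int) (run : Int) (k : Nat) (hk : k < xs.length) :
    (partials xs run).getD k 0 = run + (xs.take (k + 1)).sum := by
  induction xs generalizing run k with
  | nil => simp at hk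
  | cons x xs ih =>
    cases k with
    | zero => simp [partials]
    | succ k =>
      rw [show partials (x :: xs) run = (run + x) :: partials xs (run + x) from rfl]
      rw [List.getD_cons_succ, ih (run + x) k (by simpa using hk)]
      simp
      ring

lemma psum_eq_sum_take (c : List Int) (k : Nat) (hk : k < c.length) :
    psum c k = (c.take (k + 1)).sum := by
  induction k with
  | zero =>
    rw [show (0:Nat) + 1 = 1 from rfl, List.take_add_one, List.getElem?_eq_getElem hk]
    simp [psum, List.getD, List.take_zero, List.getElem?_eq_getElem hk]
  | succ k ih =>
    rw [List.take_add_one, List.sum_append, psum_succ, ih (by omega),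
        List.getD_eq_getElem c 0 hk, List.getElem?_eq_getElem hk]
    simp

-- short-buffer slices (the n < 0 corner: the frequency window is empty)
lemma slice_one_short (xs : List Int) (b : Int) (hx : xs.length ≤ 1) :
    PySem.List.slice xs (some 1) (some b) = [] := by
  simp only [PySem.List.slice, PySem.List.clampIdx]
  split_ifs <;> simp_all <;> omega

lemma slice_to_short (xs : List Int) (b : Int) (hb : b ≤ 0) (hx : xs.length ≤ 1) :
    PySem.List.slice xs none (some b) = [] := by
  simp only [PySem.List.slice, PySem.List.clampIdx]
  split_ifs <;> simp_all <;> omega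

-- PHASE 1: A's prefix-mutated slice equals B's running-sum list tail, for any buffer
lemma freq_eq (n : Int) (c : Array Int) (hc : c.size = (n + 2).toNat) :
    PySem.List.slice ((PySem.List.pyRange 1 (n + 1) 1).foldl solPrefStep c).toList
      (some 1) (some (n + 1)) =
    PySem.List.slice
      (((PySem.List.slice c.toList none (some (n + 1))).foldl solAltScanStep
        ((0 : Int), (#[] : Array Int))).2).toList
      (some 1) none := by
  have hlen : c.toList.length = (n + 2).toNat := by
    rw [← Array.size_eq_length_toList, hc]
  by_cases hn : 0 ≤ n
  · -- main case
    set N := n.toNat with hNdef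
    have hfold : ((PySem.List.pyRange 1 (n + 1) 1).foldl solPrefStep c).toList =
        (PySem.List.pyRange 1 (n + 1) 1).foldl prefStepL c.toList :=
      pref_fold_toList _ c (fun i hi => by
        rw [PySem.List.mem_pyRange_one] at hi; omega)
    rw [show n + 1 = ((N : Nat) : Int) + 1 by omega] at hfold ⊢
    obtain ⟨hl2, hget2⟩ := pref_fold n hn N (by omega) c.toList hlen
    rw [hfold]
    set c2 := (PySem.List.pyRange 1 ((N : Int) + 1) 1).foldl prefStepL c.toList with hc2
    -- B side: the sliced buffer and its partial sums
    have hslice : PySem.List.slice c.toList none (some ((N : Int) + 1)) =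
        c.toList.take (N + 1) := by
      rw [show ((N : Int) + 1) = (((N + 1 : Nat)) : Int) by push_cast; ring,
          PySem.List.slice_to_natCast]
    rw [hslice, scan_spec _ 0 #[]]
    simp only [List.nil_append]
    rw [PySem.List.slice_toNat c2 (by norm_num) (by omega),
        show (((N : Int) + 1)).toNat - (1 : Int).toNat = N by omega,
        show (some (1 : Int)) = (some (((1 : Nat)) : Int)) by norm_num,
        PySem.List.slice_from_natCast]
    apply List.ext_getElem
    · simp [hl2, hlen, length_partials]
      omega
    · intro k h1 h2
      have hkN : k < N := by
        simp [hl2, hlen] at h1; omega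
      rw [List.getElem_take, List.getElem_drop, List.getElem_drop,
          ← List.getD_eq_getElem _ 0 (by omega),
          ← List.getD_eq_getElem _ 0 (by rw [length_partials, List.length_take]; omega)]
      rw [show Int.toNat 1 + k = k + 1 by omega, hget2 (k + 1), if_pos (by omega),
          show (1 : Nat) + k = k + 1 by omega,
          getElem_partials _ 0 (k + 1) (by rw [List.length_take]; omega),
          List.take_take, show min (k + 1 + 1) (N + 1) = k + 1 + 1 by omega,
          psum_eq_sum_take c.toList (k + 1) (by omega), zero_add]
  · -- n < 0: both frequency lists are empty
    have hshort : c.toList.length ≤ 1 := by omega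
    rw [PySem.List.pyRange_one_eq_nil (by omega), List.foldl_nil,
        slice_one_short c.toList (n + 1) hshort,
        slice_to_short c.toList (n + 1) (by omega) hshort]
    rfl

-- max(xs) is the head of the stable descending sort, and removing its first
-- occurrence leaves the tail's multiset: the descending sort splits off the max
lemma sort_cons_max (xs : List Int) (m : Int)
    (h : PySem.List.max? xs (fun x => x) = some m) :
    xs.mergeSort (fun x y => decide (y ≤ x))
      = m :: (xs.erase m).mergeSort (fun x y => decide (y ≤ x)) := by
  have hm := PySem.List.max?_mem h
  have hmax := PySem.List.max?_isMax h
  have hsorted : ∀ ys : List Int,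
      (ys.mergeSort (fun x y => decide (y ≤ x))).Pairwise (fun x y : Int => y ≤ x) :=
    fun ys => (List.pairwise_mergeSort (by intro a b c h1 h2; simp_all; omega)
      (by intro a b; simp; omega) ys).imp (by intro a b hb; simp_all)
  refine List.Perm.eq_of_pairwise (fun a b _ _ h1 h2 => le_antisymm h2 h1) (hsorted xs) ?_ ?_
  · rw [List.pairwise_cons]
    refine ⟨fun b hb => ?_, hsorted (xs.erase m)⟩
    have hbx : b ∈ xs := List.erase_subset
      ((List.mergeSort_perm (xs.erase m) (fun x y => decide (y ≤ x))).mem_iff.mp hb)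
    exact hmax b hbx
  · exact (List.mergeSort_perm xs (fun x y => decide (y ≤ x))).trans
      ((List.perm_cons_erase hm).trans
        (List.Perm.cons m (List.mergeSort_perm (xs.erase m) (fun x y => decide (y ≤ x))).symm))

-- PHASE 2: greedy repeated-max pairing = zip of the two descending sorts
lemma pairGreedy_bound (N : Nat) : ∀ (vals freqs : List Int), vals.length ≤ N → ∀ total : Int,
    pairGreedy vals freqs total
      = total + ((vals.mergeSort (fun x y => decide (y ≤ x))).zip
          (freqs.mergeSort (fun x y => decide (y ≤ x)))).foldl (fun t p => t + p.1 * p.2) 0 := by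
  induction N with
  | zero =>
    intro vals freqs hlen total
    have hv : vals = [] := List.eq_nil_of_length_eq_zero (by omega)
    subst hv
    rw [pairGreedy.eq_def]
    split
    · rename_i mv mf h1 h2
      exact absurd h1 (by simp [PySem.List.max?])
    · simp
    · simp
  | succ N ih =>
    intro vals freqs hlen total
    rw [pairGreedy.eq_def]
    split
    · rename_i mv mf h1 h2
      have hmv := PySem.List.max?_mem h1
      have hmf := PySem.List.max?_mem h2
      rw [PySem.List.remove?_eq_some_erase vals mv hmv, PySem.List.remove?_eq_some_erase freqs mf hmf]
      simp only [Option.getD_some]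
      rw [ih _ _ (by rw [List.length_erase_of_mem hmv]
                     have := List.length_pos_of_mem hmv; omega),
          sort_cons_max vals mv h1, sort_cons_max freqs mf h2,
          List.zip_cons_cons, List.foldl_cons]
      rw [PySem.List.foldl_add, PySem.List.foldl_add]
      ring
    · rename_i mv h1 h2
      have hf : freqs = [] := (PySem.List.max?_eq_none_iff _ _).mp h2
      subst hf
      simp
    · rename_i h1
      have hv : vals = [] := (PySem.List.max?_eq_none_iff _ _).mp h1
      subst hv
      simp

lemma pairGreedy_spec (vals freqs : List Int) (total : Int) :
    pairGreedy vals freqs total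
      = total + ((vals.mergeSort (fun x y => decide (y ≤ x))).zip
          (freqs.mergeSort (fun x y => decide (y ≤ x)))).foldl (fun t p => t + p.1 * p.2) 0 :=
  pairGreedy_bound vals.length vals freqs le_rfl total

-- ===== VERDICT (by name: the statement is the Claim_ definition above) =====
theorem solution_spec : Claim_equal_solution := by
  intro n q a queries _ _
  unfold Spec_solution solution solution_alt
  simp only []
  rw [altDiffStep_eq]
  have hsize : (queries.foldl (solDiffStep n) ((PySem.List.pyRepeat [0] (n + 2)).toArray)).size
      = (n + 2).toNat := by
    rw [diff_foldl_size]
    simp [PySem.List.pyRepeat_singleton]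
  rw [freq_eq n _ hsize, pairGreedy_spec, zero_add]
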